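-- pv_equiv track=rewrite | github.com/62hoon99/daily-programmers | Python3/프로그래머스/2/389479. 서버 증설 횟수/서버 증설 횟수.py | solution
-- ===== SOURCE A (Python) =====
-- from collections import deque
--
-- def solution(players, m, k):
--     answer = 0
--
--     # 큐에 서버가 종료되는 시간 입력
--     q = deque()
--
--     for i in range(len(players)):
--         p = players[i]
--         while len(q) > 0 and q[0] <= i:
--             q.popleft()
--
--         # 추가 증설이 필요한 경우
--         if len(q) < p // m:
--             # 추가 증설 필요 대수
--             additional_server = p // m - len(q)
--
--             for _ in range(additional_server):
--                 answer += 1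
--                 q.append(i + k)
--
--     return answer
-- ===== SOURCE B (Python) =====
-- def solution(players, m, k):
--     n = len(players)
--     added = [0] * n          # added[i] = servers provisioned at hour i
--     answer = 0
--     active = 0               # servers provisioned at hours j < i still running (j + k > i)
--     for i in range(n):
--         if k > 0 and i >= k:
--             active -= added[i - k]
--         extra = players[i] // m - active
--         if extra > 0:
--             added[i] = extra
--             answer += extra
--             if k > 0:
--                 active += extra
--     return answer
-- ===== Notes on version B (the rewrite author's own statement) =====
-- stated objective: alternative
-- what changed: A keeps a deque with one entry per provisioned server and pushes/pops them individually; B keeps only a per-hour provision-count array and a running window sum of the servers still alive, doing constant integer work per hour regardless of how many servers each hour provisions.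
-- outside the precondition, e.g. on solution([4], 0, 1): A raises ZeroDivisionError, B raises ZeroDivisionError
import Mathlib
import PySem

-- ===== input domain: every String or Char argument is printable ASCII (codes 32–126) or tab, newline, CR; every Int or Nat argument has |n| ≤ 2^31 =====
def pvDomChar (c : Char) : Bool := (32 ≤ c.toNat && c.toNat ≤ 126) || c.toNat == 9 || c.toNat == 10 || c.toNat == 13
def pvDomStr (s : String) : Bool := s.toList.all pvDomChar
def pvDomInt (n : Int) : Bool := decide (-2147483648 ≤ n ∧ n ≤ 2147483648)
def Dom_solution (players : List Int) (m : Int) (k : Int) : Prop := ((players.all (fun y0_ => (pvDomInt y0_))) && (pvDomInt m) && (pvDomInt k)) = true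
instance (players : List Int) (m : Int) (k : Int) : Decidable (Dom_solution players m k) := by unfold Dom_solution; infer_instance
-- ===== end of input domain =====

-- B replaces A's deque of one entry per provisioned server by a sliding-window pass
-- over per-hour provision counts with a running sum (objective: alternative).


-- ===== PORT A =====
-- one iteration of A's main loop; state = (answer, q = deque of server end-times)
def stepA (players : List Int) (m k : Int) (st : Int × List Int) (i : Nat) : Int × List Int :=
  let p := players.getD i 0
  -- while len(q) > 0 and q[0] <= i: q.popleft()
  let q := st.2.dropWhile (fun e => decide (e ≤ (i : Int)))
  if (q.length : Int) < PySem.Int.floordiv p m then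
    let additional := PySem.Int.floordiv p m - (q.length : Int)
    -- for _ in range(additional_server): answer += 1; q.append(i + k)
    (PySem.List.pyRange 0 additional 1).foldl
      (fun st2 _ => (st2.1 + 1, st2.2 ++ [(i : Int) + k])) (st.1, q)
  else
    (st.1, q)

def solution (players : List Int) (m : Int) (k : Int) : Int :=
  ((List.range players.length).foldl (stepA players m k) (0, ([] : List Int))).1

-- ===== PORT B =====
-- one iteration of B's loop; state = (answer, active, added array)
def stepB (players : List Int) (m k : Int) (st : Int × Int × List Int) (i : Nat) : Int × Int × List Int :=
  -- if k > 0 and i >= k: active -= added[i - k]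
  let active := if 0 < k ∧ k ≤ (i : Int) then st.2.1 - st.2.2.getD (i - k.toNat) 0 else st.2.1
  let extra := PySem.Int.floordiv (players.getD i 0) m - active
  if 0 < extra then
    (st.1 + extra, (if 0 < k then active + extra else active), st.2.2.set i extra)
  else
    (st.1, active, st.2.2)

def solution_alt (players : List Int) (m : Int) (k : Int) : Int :=
  ((List.range players.length).foldl (stepB players m k)
    (0, 0, List.replicate players.length 0)).1

-- ===== PRECONDITION & SPEC =====
-- Pre_ excludes exactly m = 0, on which Python A raises ZeroDivisionError.
def Pre_solution (players : List Int) (m : Int) (k : Int) : Prop := m ≠ 0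
instance (players : List Int) (m : Int) (k : Int) : Decidable (Pre_solution players m k) := by unfold Pre_solution; infer_instance
def pvWitness_solution : List Int × Int × Int := ([6, 2, 5], 2, 2)

def Spec_solution (players : List Int) (m : Int) (k : Int) (out : Int) : Prop := out = solution_alt players m k
instance (players : List Int) (m : Int) (k : Int) (out : Int) : Decidable (Spec_solution players m k out) := by unfold Spec_solution; infer_instance

-- ===== CLAIM (what is proved, stated in full; the proofs are below) =====
def Claim_equal_solution : Prop := ∀ (players : List Int) (m : Int) (k : Int), Dom_solution players m k → Pre_solution players m k → Spec_solution players m k (solution players m k)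

-- ===== LEMMAS AND PROOFS =====

-- the multiset of end-times still in A's queue, as a list ordered by provisioning hour:
-- hour j < i contributed (a j) servers ending at j+k, still present iff t < j+k
def Qlist (a : Nat → Int) (k t : Int) (i : Nat) : List Int :=
  (List.range i).flatMap (fun (j : Nat) => if t < (j : Int) + k then List.replicate (a j).toNat ((j : Int) + k) else [])

-- B's window sum: servers provisioned at hours j < i with end-time j+k > t
def Ssum (a : Nat → Int) (k t : Int) (i : Nat) : Int :=
  ((List.range i).map (fun (j : Nat) => if t < (j : Int) + k then a j else 0)).sum

def InvAB (players : List Int) (k : Int) (i : Nat) (A : Int × List Int) (B : Int × Int × List Int) : Prop :=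
  A.1 = B.1 ∧
  B.2.2.length = players.length ∧
  (∀ j, 0 ≤ B.2.2.getD j 0) ∧
  (∀ j, i ≤ j → B.2.2.getD j 0 = 0) ∧
  A.2.dropWhile (fun e => decide (e ≤ (i : Int))) = Qlist (fun j => B.2.2.getD j 0) k i i ∧
  B.2.1 = Ssum (fun j => B.2.2.getD j 0) k ((i : Int) - 1) i

lemma Qlist_succ (a : Nat → Int) (k t : Int) (i : Nat) :
    Qlist a k t (i + 1) = Qlist a k t i ++ (if t < (i : Int) + k then List.replicate (a i).toNat ((i : Int) + k) else []) := by
  simp [Qlist, List.range_succ]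

lemma Ssum_succ (a : Nat → Int) (k t : Int) (i : Nat) :
    Ssum a k t (i + 1) = Ssum a k t i + (if t < (i : Int) + k then a i else 0) := by
  simp [Ssum, List.range_succ]

lemma Qlist_congr (a b : Nat → Int) (k t : Int) (i : Nat) (h : ∀ j < i, a j = b j) :
    Qlist a k t i = Qlist b k t i := by
  induction i with
  | zero => rfl
  | succ n ih =>
    rw [Qlist_succ, Qlist_succ, ih (fun j hj => h j (by omega)), h n (by omega)]

lemma Ssum_congr (a b : Nat → Int) (k t : Int) (i : Nat) (h : ∀ j < i, a j = b j) :
    Ssum a k t i = Ssum b k t i := by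
  induction i with
  | zero => rfl
  | succ n ih =>
    rw [Ssum_succ, Ssum_succ, ih (fun j hj => h j (by omega)), h n (by omega)]

lemma mem_Qlist (a : Nat → Int) (k t : Int) (i : Nat) (x : Int) (hx : x ∈ Qlist a k t i) :
    t < x ∧ x < (i : Int) + k := by
  induction i with
  | zero => simp [Qlist] at hx
  | succ n ih =>
    rw [Qlist_succ] at hx
    rcases List.mem_append.1 hx with h | h
    · have := ih h; exact ⟨this.1, by push_cast; omega⟩
    · split at h
      · rcases List.eq_of_mem_replicate h with rfl
        exact ⟨by assumption, by push_cast; omega⟩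
      · simp at h

lemma Qlist_sorted (a : Nat → Int) (k t : Int) (i : Nat) :
    (Qlist a k t i).Pairwise (· ≤ ·) := by
  induction i with
  | zero => simp [Qlist]
  | succ n ih =>
    rw [Qlist_succ]
    refine List.pairwise_append.2 ⟨ih, ?_, ?_⟩
    · split
      · exact List.pairwise_replicate.2 (Or.inr le_rfl)
      · simp
    · intro x hx y hy
      have h1 := (mem_Qlist a k t n x hx).2
      split at hy
      · rcases List.eq_of_mem_replicate hy with rfl; omega
      · simp at hy

lemma dropWhile_sorted_eq_filter (l : List Int) (c : Int) (hl : l.Pairwise (· ≤ ·)) :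
    l.dropWhile (fun e => decide (e ≤ c)) = l.filter (fun e => decide (c < e)) := by
  induction l with
  | nil => rfl
  | cons x xs ih =>
    rcases List.pairwise_cons.1 hl with ⟨hx, hxs⟩
    by_cases h : x ≤ c
    · simp [List.dropWhile, List.filter, h, not_lt.2 h, ih hxs]
    · have hall : ∀ y ∈ x :: xs, c < y := by
        intro y hy
        rcases List.mem_cons.1 hy with rfl | hy
        · omega
        · have := hx y hy; omega
      rw [List.dropWhile_cons_of_neg (by simpa using h)]
      rw [List.filter_eq_self.2 (by intro y hy; simpa using hall y hy)]

lemma Qlist_filter (a : Nat → Int) (k t c : Int) (i : Nat) (htc : t ≤ c) :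
    (Qlist a k t i).filter (fun e => decide (c < e)) = Qlist a k c i := by
  induction i with
  | zero => rfl
  | succ n ih =>
    rw [Qlist_succ, Qlist_succ, List.filter_append, ih]
    congr 1
    split <;> rename_i h
    · rw [List.filter_replicate]
      split <;> rename_i h2
      · rw [if_pos (by simpa using h2)]
      · rw [if_neg (by simpa using h2)]
    · rw [List.filter_nil, if_neg (by omega)]

lemma Qlist_nil (a : Nat → Int) (k t : Int) (i : Nat) (h : ∀ j : Nat, j < i → ¬ t < (j : Int) + k) :
    Qlist a k t i = [] := by
  rw [Qlist, List.flatMap_eq_nil_iff]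
  intro j hj
  rw [if_neg (h j (List.mem_range.1 hj))]

lemma len_Qlist (a : Nat → Int) (k t : Int) (i : Nat) (ha : ∀ j, 0 ≤ a j) :
    ((Qlist a k t i).length : Int) = Ssum a k t i := by
  induction i with
  | zero => rfl
  | succ n ih =>
    rw [Qlist_succ, Ssum_succ, List.length_append, ← ih]
    push_cast
    congr 1
    split
    · simp [Int.toNat_of_nonneg (ha n)]
    · simp

lemma dropWhile_replicate_true (n : Nat) (v : Int) (p : Int → Bool) (hp : p v = true) :
    (List.replicate n v).dropWhile p = [] := by
  induction n with
  | zero => rfl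
  | succ m ih => rw [List.replicate_succ, List.dropWhile_cons_of_pos hp, ih]

lemma Ssum_shift (a : Nat → Int) (k t : Int) (i : Nat) :
    Ssum a k t i = Ssum a k (t + 1) i + (if 0 ≤ t + 1 - k ∧ t + 1 - k < (i : Int) then a (t + 1 - k).toNat else 0) := by
  induction i with
  | zero =>
    simp only [Ssum, List.range_zero, List.map_nil, List.sum_nil]
    rw [if_neg (by omega : ¬(0 ≤ t + 1 - k ∧ t + 1 - k < ((0 : Nat) : Int)))]
    omega
  | succ n ih =>
    rw [Ssum_succ, Ssum_succ, ih]
    by_cases h : t + 1 - k = (n : Int)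
    · have h1 : (t + 1 - k).toNat = n := by omega
      rw [h1]
      generalize Ssum a k (t + 1) n = S
      generalize a n = x
      split_ifs <;> omega
    · generalize Ssum a k (t + 1) n = S
      generalize a n = x
      generalize a (t + 1 - k).toNat = y
      split_ifs <;> omega

lemma foldl_incr (l : List Int) (s : Int × List Int) (v : Int) :
    l.foldl (fun st2 _ => (st2.1 + 1, st2.2 ++ [v])) s = (s.1 + l.length, s.2 ++ List.replicate l.length v) := by
  induction l generalizing s with
  | nil => simp
  | cons x xs ih =>
    rw [List.foldl_cons, ih]
    simp only [List.length_cons, Prod.mk.injEq]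
    refine ⟨by push_cast; ring, ?_⟩
    rw [List.append_assoc, List.singleton_append, ← List.replicate_succ]

lemma inv_step (players : List Int) (m k : Int) (i : Nat) (hi : i < players.length)
    (A : Int × List Int) (B : Int × Int × List Int) (h : InvAB players k i A B) :
    InvAB players k (i + 1) (stepA players m k A i) (stepB players m k B i) := by
  obtain ⟨h1, h2, h3, h4, h5, h6⟩ := h
  set a : Nat → Int := fun j => B.2.2.getD j 0 with ha
  -- the active count computed by stepB equals Ssum a k i i
  have hrem : (if 0 < k ∧ k ≤ (i : Int) then B.2.1 - B.2.2.getD (i - k.toNat) 0 else B.2.1)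
      = Ssum a k (i : Int) i := by
    have := Ssum_shift a k ((i : Int) - 1) i
    simp only [sub_add_cancel] at this
    have hidx : 0 < k ∧ k ≤ (i : Int) ↔ 0 ≤ (i : Int) - k ∧ (i : Int) - k < (i : Int) := by omega
    by_cases hk : 0 < k ∧ k ≤ (i : Int)
    · have hnat : ((i : Int) - k).toNat = i - k.toNat := by omega
      rw [if_pos hk, h6, this, if_pos (hidx.1 hk), hnat]
      ring
    · rw [if_neg hk, h6, this, if_neg (fun hc => hk (hidx.2 hc))]
      ring
  -- A's queue after popping has length Ssum a k i i
  have hlen : (((Qlist a k (i : Int) i).length : Int)) = Ssum a k (i : Int) i :=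
    len_Qlist a k (i : Int) i h3
  set f := PySem.Int.floordiv (players.getD i 0) m with hf
  set extra := f - Ssum a k (i : Int) i with hextra
  have hbranch : ((Qlist a k (i : Int) i).length : Int) < f ↔ 0 < extra := by
    rw [hlen]; omega
  by_cases hpos : 0 < extra
  · -- both take the provisioning branch
    have hsetlen : (B.2.2.set i extra).length = players.length := by rw [List.length_set]; exact h2
    have ha'i : (B.2.2.set i extra).getD i 0 = extra := by
      have hil : i < B.2.2.length := by omega
      simp [List.getD, List.getElem?_set, hil]
    have ha'ne : ∀ j : Nat, j ≠ i → (B.2.2.set i extra).getD j 0 = a j := by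
      intro j hj
      simp [List.getD, List.getElem?_set, Ne.symm hj, ha]
    have hA : stepA players m k A i
        = (A.1 + extra, Qlist a k (i : Int) i ++ List.replicate extra.toNat ((i : Int) + k)) := by
      rw [stepA]
      simp only [← hf, h5, ← ha]
      rw [if_pos (hbranch.2 hpos)]
      rw [foldl_incr]
      have hlength : ((PySem.List.pyRange 0 (f - ((Qlist a k (i : Int) i).length : Int)) 1).length) = extra.toNat := by
        rw [PySem.List.length_pyRange_one]
        congr 1
        rw [hlen]
        ring
      rw [hlength, Int.toNat_of_nonneg (by omega)]
    have hB : stepB players m k B i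
        = (B.1 + extra, (if 0 < k then Ssum a k (i : Int) i + extra else Ssum a k (i : Int) i), B.2.2.set i extra) := by
      rw [stepB]
      simp only [← ha, hrem, ← hf, ← hextra]
      rw [if_pos hpos]
    rw [hA, hB]
    unfold InvAB
    dsimp only
    refine ⟨by rw [h1], hsetlen, ?_, ?_, ?_, ?_⟩
    · intro j
      by_cases hj : j = i
      · subst hj; rw [ha'i]; omega
      · rw [ha'ne j hj]; exact h3 j
    · intro j hj
      rw [ha'ne j (by omega)]; exact h4 j (by omega)
    · -- queue characterization at i+1
      by_cases hk : 0 < k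
      · have hq : Qlist a k (i : Int) i ++ List.replicate extra.toNat ((i : Int) + k)
            = Qlist (fun j => (B.2.2.set i extra).getD j 0) k (i : Int) (i + 1) := by
          rw [Qlist_succ, Qlist_congr (fun j => (B.2.2.set i extra).getD j 0) a k (i : Int) i
            (fun j hj => ha'ne j (by omega)), if_pos (by omega)]
          simp only [ha'i]
        rw [hq, dropWhile_sorted_eq_filter _ _ (Qlist_sorted _ k (i : Int) (i + 1)),
          Qlist_filter _ k (i : Int) _ (i + 1) (by push_cast; omega)]
      · rw [Qlist_nil a k (i : Int) i (by intro j hj; omega), List.nil_append,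
          dropWhile_replicate_true _ _ _ (by simp; push_cast; omega),
          Qlist_nil _ k _ (i + 1) (by intro j hj; push_cast; omega)]
    · -- active characterization at i+1
      have hcast : (((i + 1 : Nat) : Int) - 1) = (i : Int) := by push_cast; ring
      rw [hcast, Ssum_succ, Ssum_congr (fun j => (B.2.2.set i extra).getD j 0) a k (i : Int) i
        (fun j hj => ha'ne j (by omega))]
      simp only [ha'i]
      by_cases hk : 0 < k
      · rw [if_pos hk, if_pos (by omega)]
      · rw [if_neg hk, if_neg (by omega), add_zero]
  · -- no provisioning
    have hA : stepA players m k A i = (A.1, Qlist a k (i : Int) i) := by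
      rw [stepA]
      simp only [← hf, h5, ← ha]
      rw [if_neg (fun hc => hpos (hbranch.1 hc))]
    have hB : stepB players m k B i = (B.1, Ssum a k (i : Int) i, B.2.2) := by
      rw [stepB]
      simp only [← ha, hrem, ← hf, ← hextra]
      rw [if_neg hpos]
    rw [hA, hB]
    unfold InvAB
    dsimp only
    refine ⟨h1, h2, h3, fun j hj => h4 j (by omega), ?_, ?_⟩
    · have h4a : a i = 0 := h4 i le_rfl
      have hlast : Qlist a k ((i + 1 : Nat) : Int) (i + 1) = Qlist a k ((i + 1 : Nat) : Int) i := by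
        rw [Qlist_succ, h4a]
        simp
      show (Qlist a k (i : Int) i).dropWhile (fun e => decide (e ≤ ((i + 1 : Nat) : Int)))
          = Qlist a k ((i + 1 : Nat) : Int) (i + 1)
      by_cases hk : 0 < k
      · rw [dropWhile_sorted_eq_filter _ _ (Qlist_sorted a k (i : Int) i),
          Qlist_filter a k (i : Int) _ i (by push_cast; omega), hlast]
      · rw [Qlist_nil a k (i : Int) i (by intro j hj; omega), hlast,
          Qlist_nil a k _ i (by intro j hj; push_cast; omega)]
        rfl
    · show Ssum a k (i : Int) i = Ssum a k (((i + 1 : Nat) : Int) - 1) (i + 1)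
      have hcast : (((i + 1 : Nat) : Int) - 1) = (i : Int) := by push_cast; ring
      have h4a : a i = 0 := h4 i le_rfl
      rw [hcast, Ssum_succ, h4a]
      simp

lemma inv_fold (players : List Int) (m k : Int) (i : Nat) (hi : i ≤ players.length) :
    InvAB players k i ((List.range i).foldl (stepA players m k) (0, ([] : List Int)))
      ((List.range i).foldl (stepB players m k) (0, 0, List.replicate players.length 0)) := by
  induction i with
  | zero =>
    unfold InvAB
    have hz : ∀ j : Nat, (List.replicate players.length (0 : Int)).getD j 0 = 0 := by
      intro j
      by_cases hj : j < players.length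
      · simp [List.getD, List.getElem?_replicate, hj]
      · simp [List.getD, List.getElem?_eq_none (by simpa using hj)]
    refine ⟨rfl, by simp, fun j => le_of_eq (hz j).symm, fun j _ => hz j, rfl, rfl⟩
  | succ n ih =>
    rw [List.range_succ, List.foldl_append, List.foldl_append]
    exact inv_step players m k n (by omega) _ _ (ih (by omega))

-- ===== VERDICT (by name: the statement is the Claim_ definition above) =====
theorem solution_spec : Claim_equal_solution := by
  intro players m k _ _
  show solution players m k = solution_alt players m k
  exact ((inv_fold players m k players.length le_rfl).1 : _)
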